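-- pv_equiv track=rewrite | github.com/Mouh-Cine-coder/advante_of_code_2025 | day6/day6.py | gather_numbers
-- ===== SOURCE A (Python) =====
-- def gather_numbers(raw_data):
--     # read columns from left to write
--     h, w = len(raw_data), len(raw_data[0])
--     res = []
--     for col in range(w-1, -1, -1):
--         num = ''
--         for row in range(h):
--             digit = raw_data[row][col]
--             num += digit
--         res.append(num)
--
--     # delete the first row as it contains only breaking chars
--     del res[0]
--
--     # fuck this solution just added an empty el so that the group_numbers pushes the last group
--     res.append(' ')
--
--     return res
-- ===== SOURCE B (Python) =====
-- def gather_numbers(raw_data):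
--     # Single left-to-right pass over the rows: fold each row into a list of
--     # per-column prefix strings (zip truncates at the accumulator width).
--     acc = [c for c in raw_data[0]]
--     for row in raw_data[1:]:
--         acc = [a + c for a, c in zip(acc, row)]
--     acc.reverse()
--     del acc[0]
--     acc.append(' ')
--     return acc
-- ===== Notes on version B (the rewrite author's own statement) =====
-- stated objective: alternative
-- what changed: Replaces A's column-major nested index loops (raw_data[row][col] over a countdown range) by a single row-major fold: one pass over the rows that extends a list of per-column prefix strings via elementwise zip, then reverse.
import Mathlib
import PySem

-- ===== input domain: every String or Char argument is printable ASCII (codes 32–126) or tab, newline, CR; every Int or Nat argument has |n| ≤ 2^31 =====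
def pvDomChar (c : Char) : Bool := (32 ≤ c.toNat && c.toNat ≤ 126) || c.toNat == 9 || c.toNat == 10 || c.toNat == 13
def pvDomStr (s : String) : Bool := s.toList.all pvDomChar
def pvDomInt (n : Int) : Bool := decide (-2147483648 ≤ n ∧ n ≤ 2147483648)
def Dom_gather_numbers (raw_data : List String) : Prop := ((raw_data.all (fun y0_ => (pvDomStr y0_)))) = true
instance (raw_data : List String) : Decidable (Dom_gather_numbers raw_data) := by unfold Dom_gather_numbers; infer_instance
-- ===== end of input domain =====

-- B replaces A's column-major nested index loops by a single row-major fold that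
-- extends per-column prefix strings (alternative decomposition; same cost).

-- ===== PORT A =====
-- literal transliteration: countdown over columns, inner loop over rows, += on the string
def gather_numbers (raw_data : List String) : List String :=
  let h : Int := raw_data.length
  let w : Int := PySem.Str.len ((PySem.List.pyGet? raw_data 0).getD "")
  let res : List String :=
    (PySem.List.pyRange (w - 1) (-1) (-1)).foldl (fun res col =>
      let num : List Char :=
        (PySem.List.pyRange 0 h 1).foldl (fun num row =>
          num ++ (PySem.Str.pyGet? (PySem.List.pyGetD raw_data row "") col).toList) []
      res ++ [String.ofList num]) []
  -- del res[0] (Python raises on empty res; excluded by Pre_), then res.append(' ')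
  res.tail ++ [" "]

-- ===== PORT B =====
-- acc entries are the per-column prefix strings, kept as List Char
def gather_numbers_alt (raw_data : List String) : List String :=
  let acc0 : List (List Char) := ((raw_data.headD "").toList).map (fun c => [c])
  let acc : List (List Char) :=
    (raw_data.tail).foldl
      (fun acc row => (acc.zip row.toList).map (fun p => p.1 ++ [p.2])) acc0
  ((acc.map String.ofList).reverse).tail ++ [" "]

-- ===== PRECONDITION & SPEC =====
-- A raises IndexError on [] (raw_data[0]), when the first row is empty (del res[0] on []),
-- and when some row is shorter than the first row (raw_data[row][col]); exactly those are excluded.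
def Pre_gather_numbers (raw_data : List String) : Prop :=
  raw_data ≠ [] ∧ 0 < (raw_data.headD "").toList.length ∧
    ∀ s ∈ raw_data, (raw_data.headD "").toList.length ≤ s.toList.length
instance (raw_data : List String) : Decidable (Pre_gather_numbers raw_data) := by
  unfold Pre_gather_numbers; infer_instance
def pvWitness_gather_numbers : List String := ["12", "34"]

def Spec_gather_numbers (raw_data : List String) (out : List String) : Prop :=
  out = gather_numbers_alt raw_data
instance (raw_data : List String) (out : List String) : Decidable (Spec_gather_numbers raw_data out) := by
  unfold Spec_gather_numbers; infer_instance

-- ===== CLAIM (what is proved, stated in full; the proofs are below) =====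
def Claim_equal_gather_numbers : Prop := ∀ (raw_data : List String), Dom_gather_numbers raw_data → Pre_gather_numbers raw_data → Spec_gather_numbers raw_data (gather_numbers raw_data)

-- ===== LEMMAS AND PROOFS =====

-- left-to-right columns of a list of rows, of fixed width w
def pvColsL (rows : List (List Char)) (w : Nat) : List (List Char) :=
  (List.range w).map (fun i => rows.map (fun t => t.getD i ' '))

-- one fold step appends each row character to its column
theorem pvStep_eq (P : List (List Char)) (row : List Char) (w : Nat) (hw : w ≤ row.length) :
    ((pvColsL P w).zip row).map (fun p => p.1 ++ [p.2]) = pvColsL (P ++ [row]) w := by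
  apply List.ext_getElem
  · simp [pvColsL]; omega
  · intro i hi _
    have hiw : i < w := by simpa [pvColsL, hw] using hi
    simp [pvColsL, List.getElem_zip, List.getD_eq_getElem?_getD,
      List.getElem?_eq_getElem (show i < row.length by omega)]

theorem pvFold_eq (L P : List (List Char)) (w : Nat)
    (hall : ∀ r ∈ L, w ≤ r.length) :
    L.foldl (fun acc row => (acc.zip row).map (fun p => p.1 ++ [p.2])) (pvColsL P w)
      = pvColsL (P ++ L) w := by
  induction L generalizing P with
  | nil => simp
  | cons r rs ih =>
    have h1 : w ≤ r.length := hall r (List.mem_cons_self)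
    rw [List.foldl_cons, pvStep_eq P r w h1,
      ih (P ++ [r]) (fun t ht => hall t (List.mem_cons_of_mem _ ht))]
    simp

theorem pvAcc0_eq (t : List Char) :
    t.map (fun c => [c]) = pvColsL [t] t.length := by
  apply List.ext_getElem
  · simp [pvColsL]
  · intro i hi _
    have : i < t.length := by simpa using hi
    simp [pvColsL, List.getD_eq_getElem?_getD, List.getElem?_eq_getElem this]

-- the common normal form both programs reduce to
def pvCols (raw_data : List String) (w : Nat) : List String :=
  (List.range w).map (fun i =>
    String.ofList (raw_data.map (fun s => s.toList.getD i ' ')))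

theorem pvCols_eq_map (raw_data : List String) (w : Nat) :
    pvCols raw_data w = (pvColsL (raw_data.map String.toList) w).map String.ofList := by
  simp [pvCols, pvColsL, List.map_map, Function.comp_def]

theorem pvB_eq (s0 : String) (rest : List String)
    (hall : ∀ s ∈ rest, s0.toList.length ≤ s.toList.length) :
    gather_numbers_alt (s0 :: rest) =
      ((pvCols (s0 :: rest) s0.toList.length).reverse).tail ++ [" "] := by
  unfold gather_numbers_alt
  simp only [List.headD_cons, List.tail_cons]
  rw [pvAcc0_eq s0.toList]
  have hfold := pvFold_eq (rest.map String.toList) [s0.toList] s0.toList.length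
    (by intro t ht; rcases List.mem_map.1 ht with ⟨u, hu, rfl⟩; exact hall u hu)
  rw [show (rest.foldl (fun acc row =>
        (acc.zip row.toList).map (fun p => p.1 ++ [p.2])) (pvColsL [s0.toList] s0.toList.length))
      = (rest.map String.toList).foldl
        (fun acc row => (acc.zip row).map (fun p => p.1 ++ [p.2]))
        (pvColsL [s0.toList] s0.toList.length) from (List.foldl_map (f := String.toList)
        (g := fun (acc : List (List Char)) (row : List Char) => (acc.zip row).map (fun p => p.1 ++ [p.2]))
        (l := rest) (init := pvColsL [s0.toList] s0.toList.length)).symm]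
  rw [hfold, pvCols_eq_map]
  simp

-- the inner row loop over one column, as a map (col = w-1-k in range)
theorem pvInner_eq (L : List String) (w k : Nat) (hk : k < w)
    (hall : ∀ s ∈ L, w ≤ s.toList.length) :
    L.foldl (fun num s => num ++ (PySem.Str.pyGet? s ((w : Int) - 1 - (k : Int))).toList) [] =
      L.map (fun s => s.toList.getD (w - 1 - k) ' ') := by
  rw [PySem.List.foldl_congr_mem L _
      (fun num s => num ++ [s.toList.getD (w - 1 - k) ' ']) [] ?_]
  · rw [PySem.List.foldl_append_singleton_eq_map]
    simp
  · intro acc s hs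
    have hlen := hall s hs
    have hc : (w : Int) - 1 - (k : Int) = ((w - 1 - k : Nat) : Int) := by omega
    rw [hc, PySem.Str.pyGet?_natCast, List.getElem?_eq_getElem (by omega)]
    simp [List.getD_eq_getElem?_getD,
      List.getElem?_eq_getElem (show w - 1 - k < s.toList.length by omega)]

theorem pv_rev_map_range {α : Type} (G : Nat → α) (n : Nat) :
    ((List.range n).map G).reverse = (List.range n).map (fun k => G (n - 1 - k)) := by
  rw [← List.map_reverse, List.range_eq_range', List.reverse_range']
  simp [List.map_map, ← List.range_eq_range', Function.comp_def]

theorem pvA_eq (s0 : String) (rest : List String)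
    (hall : ∀ s ∈ s0 :: rest, s0.toList.length ≤ s.toList.length) :
    gather_numbers (s0 :: rest) =
      ((pvCols (s0 :: rest) s0.toList.length).reverse).tail ++ [" "] := by
  have h0 : PySem.List.pyGet? (s0 :: rest) 0 = some s0 := by
    simpa using PySem.List.pyGet?_natCast (s0 :: rest) 0
  unfold gather_numbers
  simp only [h0, Option.getD_some, PySem.Str.len_eq]
  simp only [PySem.List.foldl_append_singleton_eq_map, List.nil_append]
  rw [PySem.List.pyRange_neg_one]
  have hw : ((s0.toList.length : Int) - 1 - (-1)).toNat = s0.toList.length := by omega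
  rw [hw, List.map_map]
  unfold pvCols
  rw [pv_rev_map_range]
  congr 2
  apply List.map_congr_left
  intro k hk
  have hkw : k < s0.toList.length := List.mem_range.1 hk
  simp only [Function.comp_def]
  rw [PySem.List.foldl_pyRange_zero_pyGetD' (s0 :: rest) ""
        (fun num s => num ++ (PySem.Str.pyGet? s ((s0.toList.length : Int) - 1 - (k : Int))).toList) []]
  rw [pvInner_eq (s0 :: rest) s0.toList.length k hkw hall]

-- ===== VERDICT (by name: the statement is the Claim_ definition above) =====
theorem gather_numbers_spec : Claim_equal_gather_numbers := by
  intro raw_data _ hpre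
  obtain ⟨hne, hpos, hall⟩ := hpre
  unfold Spec_gather_numbers
  cases raw_data with
  | nil => exact absurd rfl hne
  | cons s0 rest =>
    have hall' : ∀ s ∈ s0 :: rest, s0.toList.length ≤ s.toList.length := by
      simpa using hall
    rw [pvA_eq s0 rest hall', pvB_eq s0 rest (fun s hs => hall' s (List.mem_cons_of_mem _ hs))]
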